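-- pv_equiv track=rewrite | github.com/LakshmiNarayanaLatchireddi/medai | agents/enhanced_ai_coordinator.py | _calculate_interaction_risk
-- ===== SOURCE A (Python) =====
-- from typing import Dict, List, Any, Optional
--
-- def _calculate_interaction_risk(medications: List[str]) -> int:
--     """Calculate interaction risk score"""
--     high_risk_combinations = [
--         ("warfarin", "aspirin"),
--         ("lisinopril", "potassium"),
--         ("metformin", "alcohol")
--     ]
--
--     risk_score = 2  # Base risk
--
--     for med1 in medications:
--         for med2 in medications:
--             if med1 != med2:
--                 for combo in high_risk_combinations:
--                     if (med1.lower() in combo[0] and med2.lower() in combo[1]) or \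
--                        (med1.lower() in combo[1] and med2.lower() in combo[0]):
--                         risk_score += 4
--
--     return min(risk_score, 10)
-- ===== SOURCE B (Python) =====
-- def _calculate_interaction_risk(medications):
--     """Calculate interaction risk score"""
--     high_risk_combinations = [
--         ("warfarin", "aspirin"),
--         ("lisinopril", "potassium"),
--         ("metformin", "alcohol")
--     ]
--     counts = {}
--     for med in medications:
--         counts[med] = counts.get(med, 0) + 1
--     hits = 0
--     for a, b in high_risk_combinations:
--         left = right = both = squares = 0
--         for med, c in counts.items():
--             low = med.lower()
--             xa = low in a
--             xb = low in b
--             if xa: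
--                 left += c
--             if xb:
--                 right += c
--             if xa and xb:
--                 both += c
--                 squares += c * c
--         hits += 2 * left * right - both * both - squares
--     return min(2 + 4 * hits, 10)
-- ===== Notes on version B (the rewrite author's own statement) =====
-- stated objective: faster
-- what changed: Replaced the O(n^2) double loop over medication pairs with a single counting pass per combo: build a counts dict once, tally meds matching each side of the combo, and compute the ordered-pair hit count in closed form as 2*left*right - both^2 - sum of squared counts of meds matching both sides (which removes ordered pairs of equal strings).
import Mathlib
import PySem

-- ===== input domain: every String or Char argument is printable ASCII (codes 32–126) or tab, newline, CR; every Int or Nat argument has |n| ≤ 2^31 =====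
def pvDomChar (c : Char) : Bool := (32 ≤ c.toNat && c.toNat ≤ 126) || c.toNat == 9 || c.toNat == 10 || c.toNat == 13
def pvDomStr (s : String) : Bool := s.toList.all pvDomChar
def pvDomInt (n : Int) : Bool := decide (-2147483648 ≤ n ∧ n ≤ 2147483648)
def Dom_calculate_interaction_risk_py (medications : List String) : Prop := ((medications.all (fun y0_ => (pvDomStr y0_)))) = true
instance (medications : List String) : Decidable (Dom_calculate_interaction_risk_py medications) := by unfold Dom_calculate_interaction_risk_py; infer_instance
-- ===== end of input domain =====

-- B replaces A's O(n^2) loop over ordered medication pairs by one counting pass per combo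
-- plus a closed-form pair count (2*left*right - both^2 - sum of squared counts); measured faster (asymptotic).

-- the high-risk combination table both Pythons hold as a literal
def pvCombos : List (String × String) :=
  [("warfarin", "aspirin"), ("lisinopril", "potassium"), ("metformin", "alcohol")]

-- ===== PORT A =====
def calculate_interaction_risk_py (medications : List String) : Int :=
  let risk_score : Int :=
    medications.foldl (fun r1 med1 =>
      medications.foldl (fun r2 med2 =>
        if med1 ≠ med2 then
          pvCombos.foldl (fun r3 combo =>
            if (PySem.Str.isIn (PySem.Str.lower med1) combo.1 && PySem.Str.isIn (PySem.Str.lower med2) combo.2)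
               || (PySem.Str.isIn (PySem.Str.lower med1) combo.2 && PySem.Str.isIn (PySem.Str.lower med2) combo.1)
            then r3 + 4 else r3) r2
        else r2) r1) 2
  min risk_score 10

-- ===== PORT B =====
def calculate_interaction_risk_py_alt (medications : List String) : Int :=
  let counts : PySem.Dict String Int :=
    medications.foldl (fun d med => d.insert med (d.getD med 0 + 1)) PySem.Dict.empty
  let hits : Int :=
    pvCombos.foldl (fun h c =>
      let st : Int × Int × Int × Int :=
        counts.items.foldl (fun (st : Int × Int × Int × Int) p =>
          let low := PySem.Str.lower p.1
          let xa := PySem.Str.isIn low c.1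
          let xb := PySem.Str.isIn low c.2
          ((if xa then st.1 + p.2 else st.1),
           (if xb then st.2.1 + p.2 else st.2.1),
           (if xa && xb then st.2.2.1 + p.2 else st.2.2.1),
           (if xa && xb then st.2.2.2 + p.2 * p.2 else st.2.2.2))) (0, 0, 0, 0)
      h + 2 * st.1 * st.2.1 - st.2.2.1 * st.2.2.1 - st.2.2.2) 0
  min (2 + 4 * hits) 10

-- ===== PRECONDITION & SPEC =====
def Spec_calculate_interaction_risk_py (medications : List String) (out : Int) : Prop := out = calculate_interaction_risk_py_alt medications
instance (medications : List String) (out : Int) : Decidable (Spec_calculate_interaction_risk_py medications out) := by unfold Spec_calculate_interaction_risk_py; infer_instance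

-- ===== CLAIM (what is proved, stated in full; the proofs are below) =====
def Claim_equal_calculate_interaction_risk_py : Prop := ∀ (medications : List String), Dom_calculate_interaction_risk_py medications → Spec_calculate_interaction_risk_py medications (calculate_interaction_risk_py medications)

-- ===== LEMMAS AND PROOFS =====

-- x/y: does a medication's lowercase form occur in the left/right word of a combo
def pvx (c : String × String) (m : String) : Bool := PySem.Str.isIn (PySem.Str.lower m) c.1
def pvy (c : String × String) (m : String) : Bool := PySem.Str.isIn (PySem.Str.lower m) c.2

-- the pair predicate of A's innermost test
def pvP (c : String × String) (m b : String) : Bool := (pvx c m && pvy c b) || (pvy c m && pvx c b)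

-- indicator sums over the medication list
def pvSum (f : String → Int) (L : List String) : Int := (L.map f).sum
def pvI (b : Bool) : Int := if b then 1 else 0

-- per-element total of A's combo loop
def pvW (m1 m2 : String) : Int := (pvCombos.map (fun c => if pvP c m1 m2 = true then (4:Int) else 0)).sum

-- B's four per-combo tallies as list sums
def pvXs (c : String × String) (L : List String) : Int := pvSum (fun m => pvI (pvx c m)) L
def pvYs (c : String × String) (L : List String) : Int := pvSum (fun m => pvI (pvy c m)) L
def pvBs (c : String × String) (L : List String) : Int := pvSum (fun m => pvI (pvx c m && pvy c m)) L
def pvCs (c : String × String) (L : List String) : Int :=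
  pvSum (fun m => if pvx c m && pvy c m then (L.count m : Int) else 0) L

-- the double sum with the ≠ restriction, per combo
def pvDS (c : String × String) (L : List String) : Int :=
  pvSum (fun m1 => pvSum (fun m2 => if m1 ≠ m2 ∧ pvP c m1 m2 = true then (1:Int) else 0) L) L

theorem pvSum_cons (f : String → Int) (t : String) (T : List String) :
    pvSum f (t :: T) = f t + pvSum f T := by simp [pvSum]

theorem pvSum_add (f g : String → Int) (L : List String) :
    pvSum (fun m => f m + g m) L = pvSum f L + pvSum g L :=
  PySem.List.sum_map_add_int L f g

theorem pvSum_congr (f g : String → Int) (L : List String) (h : ∀ m ∈ L, f m = g m) :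
    pvSum f L = pvSum g L := by
  unfold pvSum; rw [List.map_congr_left h]

-- a sum of "if t = m then a else 0" counts occurrences of t
theorem pvSum_ite_eq (T : List String) (t : String) (a : Int) :
    pvSum (fun m => if t = m then a else 0) T = a * (T.count t : Int) := by
  induction T with
  | nil => simp [pvSum]
  | cons s T ih =>
    rw [pvSum_cons, ih, List.count_cons]
    by_cases hts : t = s
    · simp [hts]; push_cast; ring
    · have : (s == t) = false := by simp [Ne.symm hts]
      simp [hts, this]

-- symmetry of the pair predicate
theorem pvP_symm (c : String × String) (m b : String) : pvP c m b = pvP c b m := by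
  cases hxm : pvx c m <;> cases hym : pvy c m <;> cases hxb : pvx c b <;> cases hyb : pvy c b <;>
    simp [pvP, hxm, hym, hxb, hyb]

-- pointwise inclusion-exclusion on the indicator of the pair predicate
theorem pvI_P (c : String × String) (m b : String) :
    pvI (pvP c m b) = pvI (pvx c m) * pvI (pvy c b) + pvI (pvy c m) * pvI (pvx c b)
      - pvI (pvx c m && pvy c m) * pvI (pvx c b && pvy c b) := by
  cases hxm : pvx c m <;> cases hym : pvy c m <;> cases hxb : pvx c b <;> cases hyb : pvy c b <;>
    simp [pvP, pvI, hxm, hym, hxb, hyb]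

-- row sum without the ≠ restriction
theorem pvRow (c : String × String) (m : String) (T : List String) :
    pvSum (fun b => pvI (pvP c m b)) T =
      pvI (pvx c m) * pvYs c T + pvI (pvy c m) * pvXs c T
        - pvI (pvx c m && pvy c m) * pvBs c T := by
  induction T with
  | nil => simp [pvSum, pvXs, pvYs, pvBs]
  | cons t T ih =>
    unfold pvXs pvYs pvBs at *
    rw [pvSum_cons, pvSum_cons, pvSum_cons, pvSum_cons, ih, pvI_P]
    ring

-- diagonal of the pair predicate
theorem pvP_diag (c : String × String) (m : String) : pvP c m m = (pvx c m && pvy c m) := by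
  cases hx : pvx c m <;> cases hy : pvy c m <;> simp [pvP, hx, hy]

-- row sum with the ≠ restriction: subtract the equal-string pairs
theorem pvRowNe (c : String × String) (m : String) (T : List String) :
    pvSum (fun b => if m ≠ b ∧ pvP c m b = true then (1:Int) else 0) T =
      pvSum (fun b => pvI (pvP c m b)) T - pvI (pvx c m && pvy c m) * (T.count m : Int) := by
  have hpt : ∀ b, (if m ≠ b ∧ pvP c m b = true then (1:Int) else 0)
      = pvI (pvP c m b) - (if m = b then pvI (pvx c m && pvy c m) else 0) := by
    intro b
    by_cases hmb : m = b
    · subst hmb; simp [pvP_diag, pvI]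
    · by_cases hp : pvP c m b = true <;> simp [pvI, hp, hmb]
  calc pvSum (fun b => if m ≠ b ∧ pvP c m b = true then (1:Int) else 0) T
      = pvSum (fun b => pvI (pvP c m b) + (-(if m = b then pvI (pvx c m && pvy c m) else 0))) T := by
        apply pvSum_congr; intro b _; rw [hpt b]; ring
    _ = pvSum (fun b => pvI (pvP c m b)) T + pvSum (fun b => -(if m = b then pvI (pvx c m && pvy c m) else 0)) T := pvSum_add _ _ T
    _ = _ := by
        have : pvSum (fun b => -(if m = b then pvI (pvx c m && pvy c m) else 0)) T
            = -pvSum (fun b => (if m = b then pvI (pvx c m && pvy c m) else 0)) T := by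
          unfold pvSum
          have h := List.sum_map_mul_left T (fun b => if m = b then pvI (pvx c m && pvy c m) else 0) (-1)
          simp only [neg_one_mul] at h
          exact h
        rw [this, pvSum_ite_eq]
        ring

-- cons step of the count-weighted both-sides sum
theorem pvCs_cons (c : String × String) (t : String) (T : List String) :
    pvCs c (t :: T) = pvI (pvx c t && pvy c t) * (1 + 2 * (T.count t : Int)) + pvCs c T := by
  unfold pvCs
  rw [pvSum_cons]
  have h1 : ((t :: T).count t : Int) = (T.count t : Int) + 1 := by
    rw [List.count_cons]; simp
  have h2 : pvSum (fun m => if pvx c m && pvy c m then ((t :: T).count m : Int) else 0) T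
      = pvSum (fun m => (if pvx c m && pvy c m then (T.count m : Int) else 0)
          + (if t = m then pvI (pvx c t && pvy c t) else 0)) T := by
    apply pvSum_congr; intro m _
    rw [List.count_cons]
    by_cases htm : t = m
    · subst htm
      by_cases hb : (pvx c t && pvy c t) = true <;> simp [hb, pvI] <;> push_cast <;> ring
    · have : (t == m) = false := by simp [htm]
      simp [this, htm]
  rw [h2, pvSum_add, pvSum_ite_eq, h1]
  by_cases hb : (pvx c t && pvy c t) = true <;> simp [hb, pvI] <;> ring

-- the double sum in closed form
theorem pvKey (c : String × String) (L : List String) :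
    pvDS c L = 2 * pvXs c L * pvYs c L - pvBs c L * pvBs c L - pvCs c L := by
  induction L with
  | nil => simp [pvDS, pvSum, pvXs, pvYs, pvBs, pvCs]
  | cons t T ih =>
    have hcons : pvDS c (t :: T) =
        2 * pvSum (fun b => if t ≠ b ∧ pvP c t b = true then (1:Int) else 0) T + pvDS c T := by
      unfold pvDS
      rw [pvSum_cons, pvSum_cons]
      have hdiag : (if t ≠ t ∧ pvP c t t = true then (1:Int) else 0) = 0 := by simp
      have hin : pvSum (fun m1 => pvSum (fun m2 => if m1 ≠ m2 ∧ pvP c m1 m2 = true then (1:Int) else 0) (t :: T)) T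
          = pvSum (fun m1 => (if m1 ≠ t ∧ pvP c m1 t = true then (1:Int) else 0)
              + pvSum (fun m2 => if m1 ≠ m2 ∧ pvP c m1 m2 = true then (1:Int) else 0) T) T := by
        apply pvSum_congr; intro m1 _; rw [pvSum_cons]
      rw [hdiag, hin, pvSum_add]
      have hsym : pvSum (fun m1 => if m1 ≠ t ∧ pvP c m1 t = true then (1:Int) else 0) T
          = pvSum (fun b => if t ≠ b ∧ pvP c t b = true then (1:Int) else 0) T := by
        apply pvSum_congr; intro b _
        rw [pvP_symm]
        by_cases h : t = b
        · simp [h]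
        · simp [h, Ne.symm h]
      rw [hsym]; ring
    rw [hcons, pvRowNe, pvRow, ih, pvCs_cons]
    unfold pvXs pvYs pvBs
    rw [pvSum_cons, pvSum_cons, pvSum_cons]
    have hsq : pvI (pvx c t && pvy c t) * pvI (pvx c t && pvy c t) = pvI (pvx c t && pvy c t) := by
      by_cases hb : (pvx c t && pvy c t) = true <;> simp [hb, pvI]
    have hxy : pvI (pvx c t) * pvI (pvy c t) = pvI (pvx c t && pvy c t) := by
      cases hx : pvx c t <;> cases hy : pvy c t <;> simp [pvI, hx, hy]
    nlinarith [hsq, hxy]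

-- ofList on a cons: head first, then the distinct tail elements other than the head
theorem pvOfList_cons (m : String) (T : List String) :
    PySem.Set.ofList (m :: T) = m :: (PySem.Set.ofList T).filter (fun y => !(y == m)) := by
  have h1 : PySem.Set.ofList (m :: T) = PySem.Set.update [m] T := by
    rw [PySem.Set.ofList_eq_foldl]
    simp [List.foldl_cons, PySem.Set.add, PySem.Set.update]
  rw [h1, PySem.Set.update_eq_append_filter]
  simp [PySem.Set.contains]
  apply List.filter_congr
  intro y _
  by_cases h : y = m <;> simp [h]

-- splitting a sum over a nodup list at one element
theorem pvSum_filter_split (l : List String) (hnd : l.Nodup) (m : String) (g : String → Int) :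
    (l.map g).sum = ((l.filter (fun y => !(y == m))).map g).sum + (if m ∈ l then g m else 0) := by
  induction l with
  | nil => simp
  | cons a l ih =>
    rw [List.nodup_cons] at hnd
    by_cases ham : a = m
    · subst ham
      have hnm : a ∉ l := hnd.1
      simp [List.filter_cons, ih hnd.2, hnm]
      ring
    · have : (a == m) = true → False := by simp [ham]
      simp only [List.filter_cons]
      have hk : (!(a == m)) = true := by simp [ham]
      rw [if_pos hk]
      simp only [List.map_cons, List.sum_cons, List.mem_cons]
      rw [ih hnd.2]
      have : (m ∈ [a] ∨ m ∈ l) ↔ m ∈ l := by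
        constructor
        · rintro (h | h)
          · simp at h; exact absurd h.symm ham
          · exact h
        · exact Or.inr
      by_cases hm : m ∈ l
      · simp [hm, Ne.symm ham]; ring
      · simp [hm, Ne.symm ham]
  
-- grouping: the count-weighted sum over distinct elements equals the plain sum
theorem pvGroup (L : List String) (f : String → Int) :
    ((PySem.Set.ofList L).map (fun k => (L.count k : Int) * f k)).sum = pvSum f L := by
  induction L generalizing f with
  | nil => simp [pvSum, PySem.Set.ofList]
  | cons m T ih =>
    rw [pvOfList_cons, pvSum_cons]
    simp only [List.map_cons, List.sum_cons]
    have hhead : ((m :: T).count m : Int) = (T.count m : Int) + 1 := by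
      rw [List.count_cons]; simp
    have hfilter : ((PySem.Set.ofList T).filter (fun y => !(y == m))).map (fun k => ((m :: T).count k : Int) * f k)
        = ((PySem.Set.ofList T).filter (fun y => !(y == m))).map (fun k => (T.count k : Int) * f k) := by
      apply List.map_congr_left
      intro k hk
      have hkm : (m == k) = false := by
        have := List.of_mem_filter hk
        simp at this
        simp [Ne.symm this]
      rw [List.count_cons, hkm]
      simp
    rw [hfilter]
    have hsplit := pvSum_filter_split (PySem.Set.ofList T) (PySem.Set.nodup_ofList T) m
      (fun k => (T.count k : Int) * f k)
    have hmem : m ∈ PySem.Set.ofList T ↔ m ∈ T := PySem.Set.mem_ofList T m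
    have ihT := ih (f := f)
    by_cases hmT : m ∈ T
    · have : (if m ∈ PySem.Set.ofList T then (T.count m : Int) * f m else 0) = (T.count m : Int) * f m := by
        rw [if_pos (hmem.mpr hmT)]
      rw [this] at hsplit
      have : (((PySem.Set.ofList T).filter (fun y => !(y == m))).map (fun k => (T.count k : Int) * f k)).sum = pvSum f T - (T.count m : Int) * f m := by
        have := hsplit
        rw [ihT] at this
        linarith
      rw [this, hhead]; ring
    · have hc0 : (T.count m : Int) = 0 := by
        simp [List.count_eq_zero_of_not_mem hmT]
      have : (if m ∈ PySem.Set.ofList T then (T.count m : Int) * f m else 0) = 0 := by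
        rw [if_neg (fun h => hmT (hmem.mp h))]
      rw [this] at hsplit
      have : (((PySem.Set.ofList T).filter (fun y => !(y == m))).map (fun k => (T.count k : Int) * f k)).sum = pvSum f T := by
        have := hsplit
        rw [ihT] at this
        linarith
      rw [this, hhead, hc0]; ring

-- A's innermost combo loop, closed over the literal table
theorem pvInner (m1 m2 : String) (r : Int) :
    pvCombos.foldl (fun r3 combo =>
      if (PySem.Str.isIn (PySem.Str.lower m1) combo.1 && PySem.Str.isIn (PySem.Str.lower m2) combo.2)
         || (PySem.Str.isIn (PySem.Str.lower m1) combo.2 && PySem.Str.isIn (PySem.Str.lower m2) combo.1)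
      then r3 + 4 else r3) r = r + pvW m1 m2 := by
  simp only [pvCombos, pvW, pvP, pvx, pvy, List.foldl, List.map, List.sum_cons, List.sum_nil]
  split_ifs <;> simp_all <;> ring

-- A's middle loop
theorem pvMid (m1 : String) (L : List String) (r : Int) :
    L.foldl (fun r2 med2 =>
      if m1 ≠ med2 then
        pvCombos.foldl (fun r3 combo =>
          if (PySem.Str.isIn (PySem.Str.lower m1) combo.1 && PySem.Str.isIn (PySem.Str.lower med2) combo.2)
             || (PySem.Str.isIn (PySem.Str.lower m1) combo.2 && PySem.Str.isIn (PySem.Str.lower med2) combo.1)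
          then r3 + 4 else r3) r2
      else r2) r = r + pvSum (fun m2 => if m1 ≠ m2 then pvW m1 m2 else 0) L := by
  induction L generalizing r with
  | nil => simp [pvSum]
  | cons t T ih =>
    rw [List.foldl_cons, pvSum_cons]
    by_cases h : m1 = t
    · rw [if_neg (by simp [h] : ¬ m1 ≠ t), ih, if_neg (by simp [h] : ¬ m1 ≠ t)]
      ring
    · rw [if_pos h, pvInner, ih, if_pos h]
      ring

-- A's outer loop
theorem pvOuter (L M : List String) (r : Int) :
    M.foldl (fun r1 med1 =>
      L.foldl (fun r2 med2 =>
        if med1 ≠ med2 then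
          pvCombos.foldl (fun r3 combo =>
            if (PySem.Str.isIn (PySem.Str.lower med1) combo.1 && PySem.Str.isIn (PySem.Str.lower med2) combo.2)
               || (PySem.Str.isIn (PySem.Str.lower med1) combo.2 && PySem.Str.isIn (PySem.Str.lower med2) combo.1)
            then r3 + 4 else r3) r2
        else r2) r1) r
    = r + pvSum (fun m1 => pvSum (fun m2 => if m1 ≠ m2 then pvW m1 m2 else 0) L) M := by
  induction M generalizing r with
  | nil => simp [pvSum]
  | cons t T ih =>
    rw [List.foldl_cons, pvSum_cons, pvMid, ih]
    ring

-- per-pair combo total splits into the three combos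
theorem pvW_split (m1 m2 : String) :
    (if m1 ≠ m2 then pvW m1 m2 else 0)
      = (if m1 ≠ m2 ∧ pvP ("warfarin","aspirin") m1 m2 = true then (4:Int) else 0)
      + ((if m1 ≠ m2 ∧ pvP ("lisinopril","potassium") m1 m2 = true then (4:Int) else 0)
      + (if m1 ≠ m2 ∧ pvP ("metformin","alcohol") m1 m2 = true then (4:Int) else 0)) := by
  simp only [pvW, pvCombos, List.map, List.sum_cons, List.sum_nil]
  by_cases h : m1 = m2
  · simp [h]
  · simp only [h, ne_eq, not_false_eq_true, if_pos, true_and]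
    split_ifs <;> simp_all <;> ring

-- A's fold shape → per-combo double sums
theorem pvA_eq (L : List String) :
    calculate_interaction_risk_py L =
      min (2 + (4 * pvDS ("warfarin","aspirin") L + 4 * pvDS ("lisinopril","potassium") L + 4 * pvDS ("metformin","alcohol") L)) 10 := by
  unfold calculate_interaction_risk_py
  rw [pvOuter]
  have h : pvSum (fun m1 => pvSum (fun m2 => if m1 ≠ m2 then pvW m1 m2 else 0) L) L
      = 4 * pvDS ("warfarin","aspirin") L + 4 * pvDS ("lisinopril","potassium") L + 4 * pvDS ("metformin","alcohol") L := by
    have hin : ∀ m1, pvSum (fun m2 => if m1 ≠ m2 then pvW m1 m2 else 0) L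
        = pvSum (fun m2 => if m1 ≠ m2 ∧ pvP ("warfarin","aspirin") m1 m2 = true then (4:Int) else 0) L
          + (pvSum (fun m2 => if m1 ≠ m2 ∧ pvP ("lisinopril","potassium") m1 m2 = true then (4:Int) else 0) L
          + pvSum (fun m2 => if m1 ≠ m2 ∧ pvP ("metformin","alcohol") m1 m2 = true then (4:Int) else 0) L) := by
      intro m1
      rw [← pvSum_add, ← pvSum_add]
      apply pvSum_congr; intro m2 _
      exact pvW_split m1 m2
    have h2 : pvSum (fun m1 => pvSum (fun m2 => if m1 ≠ m2 then pvW m1 m2 else 0) L) L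
        = pvSum (fun m1 => pvSum (fun m2 => if m1 ≠ m2 ∧ pvP ("warfarin","aspirin") m1 m2 = true then (4:Int) else 0) L
            + (pvSum (fun m2 => if m1 ≠ m2 ∧ pvP ("lisinopril","potassium") m1 m2 = true then (4:Int) else 0) L
            + pvSum (fun m2 => if m1 ≠ m2 ∧ pvP ("metformin","alcohol") m1 m2 = true then (4:Int) else 0) L)) L := by
      apply pvSum_congr; intro m1 _; exact hin m1
    rw [h2, pvSum_add, pvSum_add]
    have hscale : ∀ c, pvSum (fun m1 => pvSum (fun m2 => if m1 ≠ m2 ∧ pvP c m1 m2 = true then (4:Int) else 0) L) L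
        = 4 * pvDS c L := by
      intro c
      unfold pvDS pvSum
      rw [← List.sum_map_mul_left]
      congr 1
      apply List.map_congr_left
      intro m1 _
      rw [← List.sum_map_mul_left]
      congr 1
      apply List.map_congr_left
      intro m2 _
      split <;> ring
    rw [hscale, hscale, hscale]
    ring
  rw [h]

-- B's inner fold over the items list computes the four tallies componentwise
theorem pvFold4 (c : String × String) (l : List (String × Int)) (st : Int × Int × Int × Int) :
    l.foldl (fun (st : Int × Int × Int × Int) p =>
      ((if PySem.Str.isIn (PySem.Str.lower p.1) c.1 then st.1 + p.2 else st.1),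
       (if PySem.Str.isIn (PySem.Str.lower p.1) c.2 then st.2.1 + p.2 else st.2.1),
       (if PySem.Str.isIn (PySem.Str.lower p.1) c.1 && PySem.Str.isIn (PySem.Str.lower p.1) c.2 then st.2.2.1 + p.2 else st.2.2.1),
       (if PySem.Str.isIn (PySem.Str.lower p.1) c.1 && PySem.Str.isIn (PySem.Str.lower p.1) c.2 then st.2.2.2 + p.2 * p.2 else st.2.2.2))) st
    = (st.1 + (l.map (fun p => if pvx c p.1 then p.2 else 0)).sum,
       st.2.1 + (l.map (fun p => if pvy c p.1 then p.2 else 0)).sum,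
       st.2.2.1 + (l.map (fun p => if pvx c p.1 && pvy c p.1 then p.2 else 0)).sum,
       st.2.2.2 + (l.map (fun p => if pvx c p.1 && pvy c p.1 then p.2 * p.2 else 0)).sum) := by
  induction l generalizing st with
  | nil => simp
  | cons p l ih =>
    rw [List.foldl_cons, ih]
    simp only [List.map_cons, List.sum_cons, pvx, pvy]
    obtain ⟨a, b, d, e⟩ := st
    by_cases h1 : PySem.Str.isIn (PySem.Str.lower p.1) c.1 = true <;>
      by_cases h2 : PySem.Str.isIn (PySem.Str.lower p.1) c.2 = true <;>
        simp only [h1, h2, Bool.true_and, Bool.false_and, Bool.and_self, if_true, if_false,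
          ite_true, ite_false, Bool.false_eq_true, Prod.mk.injEq, eq_self_iff_true, true_and] <;>
        and_intros <;> ring

-- B's fold shape → sums
theorem pvB_eq (L : List String) :
    calculate_interaction_risk_py_alt L =
      min (2 + 4 * ((2 * pvXs ("warfarin","aspirin") L * pvYs ("warfarin","aspirin") L - pvBs ("warfarin","aspirin") L * pvBs ("warfarin","aspirin") L - pvCs ("warfarin","aspirin") L)
        + ((2 * pvXs ("lisinopril","potassium") L * pvYs ("lisinopril","potassium") L - pvBs ("lisinopril","potassium") L * pvBs ("lisinopril","potassium") L - pvCs ("lisinopril","potassium") L)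
        + (2 * pvXs ("metformin","alcohol") L * pvYs ("metformin","alcohol") L - pvBs ("metformin","alcohol") L * pvBs ("metformin","alcohol") L - pvCs ("metformin","alcohol") L)))) 10 := by
  have hcounts : L.foldl (fun (d : PySem.Dict String Int) med => d.insert med (d.getD med 0 + 1)) PySem.Dict.empty
      = PySem.Dict.counter L := PySem.Dict.foldl_insert_getD_add_one_eq_counter L
  have hitems : (PySem.Dict.counter L).items = (PySem.Set.ofList L).map (fun k => (k, (L.count k : Int))) :=
    PySem.Dict.items_counter L
  -- the four tallies over the items list, per combo
  have htally : ∀ c : String × String,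
      (((PySem.Set.ofList L).map (fun k => (k, (L.count k : Int)))).map (fun p => if pvx c p.1 then p.2 else 0)).sum = pvXs c L
      ∧ (((PySem.Set.ofList L).map (fun k => (k, (L.count k : Int)))).map (fun p => if pvy c p.1 then p.2 else 0)).sum = pvYs c L
      ∧ (((PySem.Set.ofList L).map (fun k => (k, (L.count k : Int)))).map (fun p => if pvx c p.1 && pvy c p.1 then p.2 else 0)).sum = pvBs c L
      ∧ (((PySem.Set.ofList L).map (fun k => (k, (L.count k : Int)))).map (fun p => if pvx c p.1 && pvy c p.1 then p.2 * p.2 else 0)).sum = pvCs c L := by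
    intro c
    refine ⟨?_, ?_, ?_, ?_⟩
    · rw [List.map_map]
      have : ((fun p : String × Int => if pvx c p.1 then p.2 else 0) ∘ (fun k => (k, (L.count k : Int))))
          = fun k => (L.count k : Int) * pvI (pvx c k) := by
        funext k; by_cases h : pvx c k = true <;> simp [h, pvI]
      rw [this, pvGroup]
      rfl
    · rw [List.map_map]
      have : ((fun p : String × Int => if pvy c p.1 then p.2 else 0) ∘ (fun k => (k, (L.count k : Int))))
          = fun k => (L.count k : Int) * pvI (pvy c k) := by
        funext k; by_cases h : pvy c k = true <;> simp [h, pvI]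
      rw [this, pvGroup]
      rfl
    · rw [List.map_map]
      have : ((fun p : String × Int => if pvx c p.1 && pvy c p.1 then p.2 else 0) ∘ (fun k => (k, (L.count k : Int))))
          = fun k => (L.count k : Int) * pvI (pvx c k && pvy c k) := by
        funext k
        by_cases h : (pvx c k && pvy c k) = true
        · rw [Function.comp_apply, if_pos h, h]; simp [pvI]
        · have hf : (pvx c k && pvy c k) = false := by simpa using h
          rw [Function.comp_apply, if_neg h, hf]; simp [pvI]
      rw [this, pvGroup]
      rfl
    · rw [List.map_map]
      have : ((fun p : String × Int => if pvx c p.1 && pvy c p.1 then p.2 * p.2 else 0) ∘ (fun k => (k, (L.count k : Int))))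
          = fun k => (L.count k : Int) * (if pvx c k && pvy c k then (L.count k : Int) else 0) := by
        funext k
        by_cases h : (pvx c k && pvy c k) = true
        · rw [Function.comp_apply, if_pos h, if_pos h]
        · rw [Function.comp_apply, if_neg h, if_neg h]; ring
      rw [this, pvGroup]
      rfl
  unfold calculate_interaction_risk_py_alt
  rw [hcounts]
  simp only [pvCombos, List.foldl, hitems, pvFold4]
  obtain ⟨ha1, ha2, ha3, ha4⟩ := htally ("warfarin","aspirin")
  obtain ⟨hb1, hb2, hb3, hb4⟩ := htally ("lisinopril","potassium")
  obtain ⟨hc1, hc2, hc3, hc4⟩ := htally ("metformin","alcohol")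
  rw [ha1, ha2, ha3, ha4, hb1, hb2, hb3, hb4, hc1, hc2, hc3, hc4]
  ring_nf

-- ===== VERDICT (by name: the statement is the Claim_ definition above) =====
theorem calculate_interaction_risk_py_spec : Claim_equal_calculate_interaction_risk_py := by
  intro L _
  show calculate_interaction_risk_py L = calculate_interaction_risk_py_alt L
  rw [pvA_eq, pvB_eq, pvKey, pvKey, pvKey]
  ring_nf
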